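-- pv_equiv track=rewrite | github.com/thealper2/codewars-solutions | 7-kyu/simple_jeringonza.py | jeringonza
-- ===== SOURCE A (Python) =====
-- def jeringonza(s):
--     vowels = 'aeiouAEIOU'
--     result = ''
--     for c in s:
--         if c in vowels:
--             result += c + ('p' if c.islower() else 'P') + c
--         else:
--             result += c
--
--     return result
-- ===== SOURCE B (Python) =====
-- def jeringonza(s):
--     for v in 'aeiou':
--         s = s.replace(v, v + 'p' + v)
--     for v in 'AEIOU':
--         s = s.replace(v, v + 'P' + v)
--     return s
-- ===== Notes on version B (the rewrite author's own statement) =====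
-- stated objective: faster
-- what changed: Replaced A's single per-character Python loop with membership test and string concatenation by ten staged whole-string str.replace passes, one per vowel; correct because each expansion introduces only the inserted consonant and a copy of the already-processed vowel, which no later pass touches.
import Mathlib
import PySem

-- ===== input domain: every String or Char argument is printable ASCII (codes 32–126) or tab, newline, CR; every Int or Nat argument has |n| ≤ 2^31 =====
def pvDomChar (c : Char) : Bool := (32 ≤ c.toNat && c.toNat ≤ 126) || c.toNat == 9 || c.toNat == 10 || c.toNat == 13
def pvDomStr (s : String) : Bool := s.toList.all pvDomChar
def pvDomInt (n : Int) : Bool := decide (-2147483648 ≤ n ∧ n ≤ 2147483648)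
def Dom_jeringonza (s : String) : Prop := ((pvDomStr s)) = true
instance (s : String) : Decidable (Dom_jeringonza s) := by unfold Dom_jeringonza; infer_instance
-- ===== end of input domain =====

-- B replaces A's single per-character loop by ten staged whole-string replace
-- passes, one per vowel (objective: faster, measured).

-- ===== PORT A =====
def jeringonza (s : String) : String :=
  s.toList.foldl
    (fun result c =>
      if ("aeiouAEIOU".toList).contains c then
        result ++ String.ofList [c, if PySem.Chars.islower c then 'p' else 'P', c]
      else
        result ++ String.ofList [c]) ""

-- ===== PORT B =====
def jeringonza_alt (s : String) : String :=
  let s1 := "aeiou".toList.foldl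
    (fun t v => PySem.Str.replace t (String.ofList [v]) (String.ofList [v, 'p', v])) s
  "AEIOU".toList.foldl
    (fun t v => PySem.Str.replace t (String.ofList [v]) (String.ofList [v, 'P', v])) s1

-- ===== PRECONDITION & SPEC =====
def Spec_jeringonza (s : String) (out : String) : Prop := out = jeringonza_alt s
instance (s : String) (out : String) : Decidable (Spec_jeringonza s out) := by unfold Spec_jeringonza; infer_instance

-- ===== CLAIM (what is proved, stated in full; the proofs are below) =====
def Claim_equal_jeringonza : Prop := ∀ (s : String), Dom_jeringonza s → Spec_jeringonza s (jeringonza s)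

-- ===== LEMMAS AND PROOFS =====

-- per-character expansion both programs realise
def jerExp (c : Char) : List Char :=
  if ("aeiouAEIOU".toList).contains c then
    [c, if PySem.Chars.islower c then 'p' else 'P', c]
  else [c]

-- one replace pass with a single-character pattern, as a flatMap
def jerStep (v : Char) (r : List Char) (l : List Char) : List Char :=
  l.flatMap (fun c => if c == v then r else [c])

theorem jer_go_single (v : Char) (r : List Char) :
    ∀ (fuel : Nat) (l acc : List Char), l.length ≤ fuel →
      PySem.Chars.replace.go [v] r fuel l acc = acc.reverse ++ jerStep v r l := by
  intro fuel
  induction fuel with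
  | zero =>
    intro l acc h
    have : l = [] := by cases l <;> simp_all
    subst this; simp [PySem.Chars.replace.go, jerStep]
  | succ n ih =>
    intro l acc h
    cases l with
    | nil => simp [PySem.Chars.replace.go, jerStep]
    | cons c t =>
      rw [PySem.Chars.replace.go]
      simp only [List.isPrefixOf, Bool.and_true]
      by_cases hv : v = c
      · subst hv
        simp only [beq_self_eq_true, if_pos]
        rw [ih _ _ (by simpa using Nat.le_of_succ_le_succ h)]
        simp [jerStep]
      · have hb : (v == c) = false := by simp [hv]
        rw [hb]
        simp only [if_neg Bool.false_ne_true]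
        rw [ih _ _ (by simpa using Nat.le_of_succ_le_succ h)]
        simp [jerStep, Ne.symm hv]

theorem jer_replace_single (v : Char) (r l : List Char) :
    PySem.Chars.replace l [v] r = jerStep v r l := by
  rw [PySem.Chars.replace]
  simp only [List.isEmpty_cons, if_neg Bool.false_ne_true]
  simpa using jer_go_single v r l.length l [] le_rfl

theorem jer_step_flatMap (v : Char) (r : List Char) (g : Char → List Char) (l : List Char) :
    jerStep v r (l.flatMap g) = l.flatMap (fun c => jerStep v r (g c)) := by
  unfold jerStep; exact List.flatMap_assoc ..

-- a fold of single-char replace passes distributes over a flatMap decomposition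
theorem jer_fold_steps_flatMap (ps : List (Char × List Char)) :
    ∀ (g : Char → List Char) (l : List Char),
      ps.foldl (fun t p => jerStep p.1 p.2 t) (l.flatMap g)
        = l.flatMap (fun c => ps.foldl (fun t p => jerStep p.1 p.2 t) (g c)) := by
  induction ps with
  | nil => intro g l; simp
  | cons p ps ih =>
    intro g l
    simp only [List.foldl_cons]
    rw [jer_step_flatMap, ih]

-- A's fold builds exactly the flatMap of jerExp
theorem jer_A_eq (l : List Char) (acc : String) :
    (l.foldl
      (fun result c =>
        if ("aeiouAEIOU".toList).contains c then
          result ++ String.ofList [c, if PySem.Chars.islower c then 'p' else 'P', c]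
        else
          result ++ String.ofList [c]) acc).toList
    = acc.toList ++ l.flatMap jerExp := by
  induction l generalizing acc with
  | nil => simp
  | cons c t ih =>
    rw [List.foldl_cons]
    have hstep :
        (if ("aeiouAEIOU".toList).contains c then
            acc ++ String.ofList [c, if PySem.Chars.islower c then 'p' else 'P', c]
          else acc ++ String.ofList [c])
          = acc ++ String.ofList (jerExp c) := by
      unfold jerExp
      rw [← apply_ite (fun x => acc ++ String.ofList x)]
    rw [hstep, ih]
    simp [String.toList_append]

-- B's passes, moved to the char-list level
theorem jer_B_toList (vs : List Char) (p : Char) :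
    ∀ (s : String),
      (vs.foldl (fun t v => PySem.Str.replace t (String.ofList [v]) (String.ofList [v, p, v])) s).toList
        = (vs.map (fun v => (v, [v, p, v]))).foldl (fun t q => jerStep q.1 q.2 t) s.toList := by
  induction vs with
  | nil => intro s; rfl
  | cons v vs ih =>
    intro s
    simp only [List.foldl_cons, List.map_cons]
    rw [ih]
    congr 1
    rw [PySem.Str.toList_replace, String.toList_ofList, String.toList_ofList,
      jer_replace_single]

def jerPasses : List (Char × List Char) :=
  ("aeiou".toList.map (fun v => (v, [v, 'p', v]))) ++ ("AEIOU".toList.map (fun v => (v, [v, 'P', v])))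

-- the composed effect of all ten passes on one character is jerExp
theorem jer_passes_single (c : Char) :
    jerPasses.foldl (fun t q => jerStep q.1 q.2 t) [c] = jerExp c := by
  by_cases h1 : c = 'a'; · subst h1; decide
  by_cases h2 : c = 'e'; · subst h2; decide
  by_cases h3 : c = 'i'; · subst h3; decide
  by_cases h4 : c = 'o'; · subst h4; decide
  by_cases h5 : c = 'u'; · subst h5; decide
  by_cases h6 : c = 'A'; · subst h6; decide
  by_cases h7 : c = 'E'; · subst h7; decide
  by_cases h8 : c = 'I'; · subst h8; decide
  by_cases h9 : c = 'O'; · subst h9; decide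
  by_cases h10 : c = 'U'; · subst h10; decide
  simp [jerPasses, jerStep, jerExp, h1, h2, h3, h4, h5, h6, h7, h8, h9, h10]

theorem jer_B_eq (s : String) :
    (jeringonza_alt s).toList = s.toList.flatMap jerExp := by
  unfold jeringonza_alt
  rw [jer_B_toList, jer_B_toList]
  rw [← List.foldl_append, ← jerPasses]
  have h := jer_fold_steps_flatMap jerPasses (fun c => [c]) s.toList
  simp only [List.flatMap_singleton'] at h
  rw [h]
  simp only [jer_passes_single]

-- ===== VERDICT (by name: the statement is the Claim_ definition above) =====
theorem jeringonza_spec : Claim_equal_jeringonza := by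
  intro s _
  unfold Spec_jeringonza
  apply String.toList_inj.mp
  rw [jer_B_eq]
  unfold jeringonza
  simpa using jer_A_eq s.toList ""
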